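-- pv_equiv track=rewrite | github.com/proformatique/algo | tp4/__init__.py | remplacer
-- ===== SOURCE A (Python) =====
-- def remplacer(mot1: str, mot2: str, texte: str) -> str:
--     """Retourne une version de texte avec mot2 au lieu de mot1.
--
--     Parameters
--     ----------
--     texte :
--         texte source
--     mot1 :
--         mot à remplacer
--     mot2 :
--         mot de remplacement
--
--     Returns
--     -------
--     copie: str
--         texte modifié
--
--     Examples
--     --------
--     >>> remplacer('im', '', 'impossible')
--     'possible'
--     >>> remplacer('', '', 'possible')
--     'possible'
--     >>> remplacer('s', 'S', 'possible')
--     'poSSible'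
--     """
--     copie = ''
--     i = 0
--     n = len(mot1)
--     m = len(mot2)
--     while i < len(texte):
--         if n and mot1 == texte[i:i + n]: # lazy evaluation
--             copie += mot2
--             i += n # si n == 0 boucle infinie
--             # i += n if n > m else m # pour la forme des cartes
--         else:
--             copie += texte[i]
--             i += 1
--     return copie
-- ===== SOURCE B (Python) =====
-- def remplacer(mot1: str, mot2: str, texte: str) -> str:
--     """Retourne une version de texte avec mot2 au lieu de mot1."""
--     if not mot1:
--         return texte
--     parts = []
--     start = 0
--     n = len(mot1)
--     while True:
--         j = texte.find(mot1, start)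
--         if j == -1:
--             parts.append(texte[start:])
--             break
--         parts.append(texte[start:j])
--         parts.append(mot2)
--         start = j + n
--     return ''.join(parts)
-- ===== Notes on version B (the rewrite author's own statement) =====
-- stated objective: faster
-- what changed: Replaces A's per-character while-loop (slice-compare at every index, string += per char) with a cursor loop that jumps between occurrences via str.find and emits whole slices joined at the end.
import Mathlib
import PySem

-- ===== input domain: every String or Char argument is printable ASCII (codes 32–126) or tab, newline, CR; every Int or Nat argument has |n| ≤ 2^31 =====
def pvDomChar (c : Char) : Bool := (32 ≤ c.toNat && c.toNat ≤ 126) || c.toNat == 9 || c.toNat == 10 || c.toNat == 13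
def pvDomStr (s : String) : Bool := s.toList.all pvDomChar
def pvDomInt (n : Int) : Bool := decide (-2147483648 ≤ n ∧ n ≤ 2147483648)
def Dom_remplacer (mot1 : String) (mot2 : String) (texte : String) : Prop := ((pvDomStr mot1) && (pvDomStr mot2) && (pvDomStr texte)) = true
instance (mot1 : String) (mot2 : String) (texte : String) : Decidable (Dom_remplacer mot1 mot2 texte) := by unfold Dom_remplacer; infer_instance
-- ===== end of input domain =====

-- B replaces A's per-character scan (slice-compare at every index) with a cursor loop
-- that jumps between occurrences via str.find and emits whole slices; equal return values.

-- ===== PORT A =====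
-- A's while-loop over index i, phrased on the remaining suffix t = texte[i:]:
-- texte[i:i+n] is t.take n (nonnegative in-order slice bounds), 'n and …' is m1 ≠ [] ∧ ….
def aLoop (m1 m2 t : List Char) : List Char :=
  match t with
  | [] => []
  | c :: tl =>
    if m1 ≠ [] ∧ m1 = (c :: tl).take m1.length then
      m2 ++ aLoop m1 m2 ((c :: tl).drop m1.length)
    else
      c :: aLoop m1 m2 tl
termination_by t.length
decreasing_by
  · have hm : 0 < m1.length := List.length_pos_iff.mpr (by rename_i h; exact h.1)
    simp only [List.length_drop, List.length_cons]; omega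
  · simp

def remplacer (mot1 : String) (mot2 : String) (texte : String) : String :=
  String.ofList (aLoop mot1.toList mot2.toList texte.toList)

-- ===== PORT B =====
-- B's find-and-jump cursor loop, phrased on the remaining suffix t = texte[start:]:
-- texte.find(mot1, start) is PySem.Chars.find on the suffix (index j relative to start),
-- texte[start:j] is t.take j_rel, the appended parts of ''.join become the ++'s.
def bLoop (m1 m2 t : List Char) : List Char :=
  if hm : m1 = [] then t
  else
    let j := PySem.Chars.find t m1
    if j = -1 then t
    else
      t.take j.toNat ++ m2 ++ bLoop m1 m2 (t.drop (j.toNat + m1.length))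
termination_by t.length
decreasing_by
  have h0 : (0:Int) ≤ PySem.Chars.find t m1 := by
    have := PySem.Chars.neg_one_le_find (s := t) (sub := m1); omega
  have hpre := (PySem.Chars.find_spec (s := t) (sub := m1) h0).1
  have hm1 : 0 < m1.length := List.length_pos_iff.mpr hm
  have hlt : (PySem.Chars.find t m1).toNat < t.length := by
    have := hpre.length_le
    simp only [List.length_drop] at this
    omega
  simp only [List.length_drop]; omega

def remplacer_alt (mot1 : String) (mot2 : String) (texte : String) : String :=
  if mot1.toList = [] then texte
  else String.ofList (bLoop mot1.toList mot2.toList texte.toList)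

-- ===== PRECONDITION & SPEC =====
def Spec_remplacer (mot1 : String) (mot2 : String) (texte : String) (out : String) : Prop := out = remplacer_alt mot1 mot2 texte
instance (mot1 : String) (mot2 : String) (texte : String) (out : String) : Decidable (Spec_remplacer mot1 mot2 texte out) := by unfold Spec_remplacer; infer_instance

-- ===== CLAIM (what is proved, stated in full; the proofs are below) =====
def Claim_equal_remplacer : Prop := ∀ (mot1 : String) (mot2 : String) (texte : String), Dom_remplacer mot1 mot2 texte → Spec_remplacer mot1 mot2 texte (remplacer mot1 mot2 texte)

-- ===== LEMMAS AND PROOFS =====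

-- With an empty needle A's test 'n and …' is always false: the loop copies texte.
lemma aLoop_nil (m2 t : List Char) : aLoop [] m2 t = t := by
  induction t with
  | nil => simp [aLoop]
  | cons c tl ih => rw [aLoop]; simp [ih]

-- If m1 occurs nowhere in t, A's loop copies t unchanged.
lemma aLoop_no_match (m1 m2 : List Char) (hm : m1 ≠ []) :
    ∀ t, ¬ m1 <:+: t → aLoop m1 m2 t = t := by
  intro t
  induction t with
  | nil => intro _; simp [aLoop]
  | cons c tl ih =>
    intro hno
    rw [aLoop]
    have hnp : ¬ (m1 ≠ [] ∧ m1 = (c :: tl).take m1.length) := by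
      rintro ⟨-, h⟩
      exact hno (h ▸ (List.take_prefix m1.length (c :: tl)).isInfix)
    rw [if_neg hnp, ih (fun h => hno (List.infix_cons h))]

-- If the FIRST occurrence of m1 in t is at index j, A's loop copies t.take j,
-- emits m2 and continues after the occurrence — exactly one step of B's loop.
lemma aLoop_match_first (m1 m2 : List Char) (hm : m1 ≠ []) :
    ∀ (j : ℕ) (t : List Char), m1 <+: t.drop j → (∀ i, i < j → ¬ m1 <+: t.drop i) →
    aLoop m1 m2 t = t.take j ++ m2 ++ aLoop m1 m2 (t.drop (j + m1.length)) := by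
  intro j
  induction j with
  | zero =>
    intro t hpre _
    simp only [List.drop_zero] at hpre
    have ht : t ≠ [] := by
      intro h; subst h
      exact hm (List.prefix_nil.mp hpre)
    obtain ⟨c, tl, rfl⟩ := List.exists_cons_of_ne_nil ht
    rw [aLoop]
    rw [if_pos ⟨hm, List.prefix_iff_eq_take.mp hpre⟩]
    simp
  | succ j ih =>
    intro t hpre hmin
    have ht : t ≠ [] := by
      intro h; subst h
      simp at hpre
      exact hm hpre
    obtain ⟨c, tl, rfl⟩ := List.exists_cons_of_ne_nil ht
    have hnp : ¬ (m1 ≠ [] ∧ m1 = (c :: tl).take m1.length) := by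
      rintro ⟨-, h⟩
      exact hmin 0 (Nat.succ_pos j) (by simpa using List.prefix_iff_eq_take.mpr h)
    rw [aLoop, if_neg hnp]
    rw [ih tl (by simpa using hpre) (fun i hi => by simpa using hmin (i+1) (by omega))]
    simp [Nat.succ_add]

theorem aLoop_eq_bLoop (m1 m2 t : List Char) : aLoop m1 m2 t = bLoop m1 m2 t := by
  fun_induction bLoop m1 m2 t with
  | case1 t hm => subst hm; exact aLoop_nil m2 t
  | case2 t hm j hj =>
    exact aLoop_no_match m1 m2 hm t (by
      rw [← PySem.Chars.find_eq_neg_one_iff (s := t) (sub := m1)]; exact hj)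
  | case3 t hm j hj ih =>
    have h0 : (0:Int) ≤ PySem.Chars.find t m1 := by
      have := PySem.Chars.neg_one_le_find (s := t) (sub := m1)
      simp only [j] at hj ⊢; omega
    have hspec := PySem.Chars.find_spec (s := t) (sub := m1) h0
    rw [aLoop_match_first m1 m2 hm j.toNat t hspec.1 hspec.2, ih]

-- ===== VERDICT (by name: the statement is the Claim_ definition above) =====
theorem remplacer_spec : Claim_equal_remplacer := by
  intro mot1 mot2 texte _
  unfold Spec_remplacer remplacer remplacer_alt
  by_cases h : mot1.toList = []
  · simp [h, aLoop_nil]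
  · rw [if_neg h, aLoop_eq_bLoop]
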